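-- pv_equiv track=rewrite | github.com/MalayVyas/LangChain-DummyAI | app.py | _clean_candidates
-- ===== SOURCE A (Python) =====
-- from typing import List, Dict, Any, Tuple
--
-- def _clean_candidates(cands: List[str]) -> List[str]:
--     seen, ordered = set(), []
--     for c in cands:
--         if c in seen: continue
--         if "exp" in c or "research" in c: continue
--         if "flash" in c:
--             seen.add(c); ordered.append(c)
--     for c in cands:
--         if c in seen: continue
--         if "exp" in c or "research" in c: continue
--         if "pro" in c:
--             seen.add(c); ordered.append(c)
--     for c in cands:
--         if c in seen: continue
--         seen.add(c); ordered.append(c)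
--     return ordered
-- ===== SOURCE B (Python) =====
-- from typing import List
--
-- def _clean_candidates(cands: List[str]) -> List[str]:
--     def prio(c: str) -> int:
--         if "exp" in c or "research" in c:
--             return 2
--         if "flash" in c:
--             return 0
--         if "pro" in c:
--             return 1
--         return 2
--     buckets = ([], [], [])
--     seen = set()
--     for c in cands:
--         if c not in seen:
--             seen.add(c)
--             buckets[prio(c)].append(c)
--     return buckets[0] + buckets[1] + buckets[2]
-- ===== Notes on version B (the rewrite author's own statement) =====
-- stated objective: simpler
-- what changed: Replaces A's three sequential filter passes over the list (flash, then pro, then rest, sharing one seen-set) by a single pass that deduplicates and partitions each candidate into one of three priority buckets via a key function, then concatenates the buckets.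
import Mathlib
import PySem

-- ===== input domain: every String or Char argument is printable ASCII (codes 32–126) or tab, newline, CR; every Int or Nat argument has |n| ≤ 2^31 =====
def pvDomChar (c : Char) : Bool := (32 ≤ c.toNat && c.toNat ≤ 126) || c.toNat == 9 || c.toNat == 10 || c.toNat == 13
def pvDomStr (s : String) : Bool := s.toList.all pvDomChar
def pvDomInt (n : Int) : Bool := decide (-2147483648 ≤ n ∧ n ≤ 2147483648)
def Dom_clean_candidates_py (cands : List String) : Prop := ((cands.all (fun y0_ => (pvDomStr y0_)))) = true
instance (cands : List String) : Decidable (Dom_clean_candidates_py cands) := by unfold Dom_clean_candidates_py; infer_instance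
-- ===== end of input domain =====

-- B replaces A's three sequential filter passes by a single dedup-and-partition pass
-- into three priority buckets (objective: simpler, one pass instead of three).

-- ===== PORT A =====
-- loop body of A's first pass ("flash" candidates)
def stepA1 (st : PySem.Set String × List String) (c : String) : PySem.Set String × List String :=
  if PySem.Set.contains st.1 c then st
  else if PySem.Str.isIn "exp" c || PySem.Str.isIn "research" c then st
  else if PySem.Str.isIn "flash" c then (PySem.Set.add st.1 c, st.2 ++ [c]) else st

-- loop body of A's second pass ("pro" candidates)
def stepA2 (st : PySem.Set String × List String) (c : String) : PySem.Set String × List String :=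
  if PySem.Set.contains st.1 c then st
  else if PySem.Str.isIn "exp" c || PySem.Str.isIn "research" c then st
  else if PySem.Str.isIn "pro" c then (PySem.Set.add st.1 c, st.2 ++ [c]) else st

-- loop body of A's third pass (everything remaining)
def stepA3 (st : PySem.Set String × List String) (c : String) : PySem.Set String × List String :=
  if PySem.Set.contains st.1 c then st
  else (PySem.Set.add st.1 c, st.2 ++ [c])

def clean_candidates_py (cands : List String) : List String :=
  let st1 := cands.foldl stepA1 (PySem.Set.empty, [])
  let st2 := cands.foldl stepA2 st1
  let st3 := cands.foldl stepA3 st2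
  st3.2

-- ===== PORT B =====
-- B's priority key function
def prioB (c : String) : Nat :=
  if PySem.Str.isIn "exp" c || PySem.Str.isIn "research" c then 2
  else if PySem.Str.isIn "flash" c then 0
  else if PySem.Str.isIn "pro" c then 1
  else 2

-- B's single loop body: dedup with seen, append to the bucket selected by prioB
def stepB (st : PySem.Set String × (List String × List String × List String)) (c : String) :
    PySem.Set String × (List String × List String × List String) :=
  if PySem.Set.contains st.1 c then st
  else (PySem.Set.add st.1 c,
    if prioB c = 0 then (st.2.1 ++ [c], st.2.2.1, st.2.2.2)
    else if prioB c = 1 then (st.2.1, st.2.2.1 ++ [c], st.2.2.2)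
    else (st.2.1, st.2.2.1, st.2.2.2 ++ [c]))

def clean_candidates_py_alt (cands : List String) : List String :=
  let st := cands.foldl stepB (PySem.Set.empty, ([], [], []))
  st.2.1 ++ st.2.2.1 ++ st.2.2.2

-- ===== PRECONDITION & SPEC =====
def Spec_clean_candidates_py (cands : List String) (out : List String) : Prop := out = clean_candidates_py_alt cands
instance (cands : List String) (out : List String) : Decidable (Spec_clean_candidates_py cands out) := by unfold Spec_clean_candidates_py; infer_instance

-- ===== CLAIM (what is proved, stated in full; the proofs are below) =====
def Claim_equal_clean_candidates_py : Prop := ∀ (cands : List String), Dom_clean_candidates_py cands → Spec_clean_candidates_py cands (clean_candidates_py cands)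

-- ===== LEMMAS AND PROOFS =====

-- the keep-tests of A's first two passes
def kA1 (c : String) : Bool :=
  !(PySem.Str.isIn "exp" c || PySem.Str.isIn "research" c) && PySem.Str.isIn "flash" c
def kA2 (c : String) : Bool :=
  !(PySem.Str.isIn "exp" c || PySem.Str.isIn "research" c) && PySem.Str.isIn "pro" c

-- one A-pass, as a structural recursion: (final seen set, emitted list)
def sel (k : String → Bool) (s : List String) : List String → List String × List String
  | [] => (s, [])
  | c :: cs =>
    if s.contains c then sel k s cs
    else if k c then
      let r := sel k (s ++ [c]) cs
      (r.1, c :: r.2)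
    else sel k s cs

-- B's bucket i, as a structural recursion over the list with the evolving seen set
def selp (i : Nat) (t : List String) : List String → List String
  | [] => []
  | c :: cs =>
    if t.contains c then selp i t cs
    else if prioB c = i then c :: selp i (t ++ [c]) cs
    else selp i (t ++ [c]) cs

lemma foldl_step_eq (k : String → Bool)
    (step : PySem.Set String × List String → String → PySem.Set String × List String)
    (hstep : ∀ st c, step st c =
      if st.1.contains c then st else if k c then (st.1 ++ [c], st.2 ++ [c]) else st) :
    ∀ (cands : List String) (s o : List String),
      cands.foldl step (s, o) = ((sel k s cands).1, o ++ (sel k s cands).2) := by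
  intro cands
  induction cands with
  | nil => intro s o; simp [sel]
  | cons c cs ih =>
    intro s o
    simp only [List.foldl_cons, hstep, sel]
    by_cases hs : c ∈ s
    · simp [hs, ih]
    · by_cases hk : k c
      · simp [hs, hk, ih]
      · simp [hs, hk, ih]

lemma hstepA1 : ∀ st c, stepA1 st c =
    if st.1.contains c then st else if kA1 c then (st.1 ++ [c], st.2 ++ [c]) else st := by
  intro st c
  simp only [stepA1, kA1, PySem.Set.contains, PySem.Set.add]
  by_cases h1 : c ∈ st.1 <;>
    by_cases he : PySem.Str.isIn "exp" c = true <;>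
      by_cases hr : PySem.Str.isIn "research" c = true <;>
        by_cases h3 : PySem.Str.isIn "flash" c = true <;> simp_all

lemma hstepA2 : ∀ st c, stepA2 st c =
    if st.1.contains c then st else if kA2 c then (st.1 ++ [c], st.2 ++ [c]) else st := by
  intro st c
  simp only [stepA2, kA2, PySem.Set.contains, PySem.Set.add]
  by_cases h1 : c ∈ st.1 <;>
    by_cases he : PySem.Str.isIn "exp" c = true <;>
      by_cases hr : PySem.Str.isIn "research" c = true <;>
        by_cases h3 : PySem.Str.isIn "pro" c = true <;> simp_all

lemma hstepA3 : ∀ st c, stepA3 st c =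
    if st.1.contains c then st else if (fun _ : String => true) c then (st.1 ++ [c], st.2 ++ [c]) else st := by
  intro st c
  simp only [stepA3, PySem.Set.contains, PySem.Set.add]
  by_cases h1 : c ∈ st.1 <;> simp_all

-- membership in the seen set after a pass
lemma sel_fst_mem (k : String → Bool) :
    ∀ (cands s : List String) (x : String),
      x ∈ (sel k s cands).1 ↔ x ∈ s ∨ (k x = true ∧ x ∈ cands) := by
  intro cands
  induction cands with
  | nil => intro s x; simp [sel]
  | cons c cs ih =>
    intro s x
    simp only [sel]
    split_ifs with hs hk
    · rw [ih]
      have hc : c ∈ s := by simpa using hs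
      simp only [List.mem_cons]
      by_cases hx : x = c
      · subst hx; tauto
      · tauto
    · simp only []
      rw [ih]
      simp only [List.mem_append, List.mem_cons]
      by_cases hx : x = c
      · subst hx; tauto
      · tauto
    · rw [ih]
      simp only [List.mem_cons]
      by_cases hx : x = c
      · subst hx; tauto
      · tauto

-- key facts about the priority function
lemma prioB_cases (c : String) : prioB c = 0 ∨ prioB c = 1 ∨ prioB c = 2 := by
  unfold prioB; split_ifs <;> simp

lemma kA1_iff (c : String) : kA1 c = true ↔ prioB c = 0 := by
  simp only [kA1, prioB]
  by_cases he : PySem.Str.isIn "exp" c = true <;>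
    by_cases hr : PySem.Str.isIn "research" c = true <;>
      by_cases hf : PySem.Str.isIn "flash" c = true <;>
        by_cases hp : PySem.Str.isIn "pro" c = true <;>
          simp_all

lemma kA2_of_prio1 (c : String) (h : prioB c = 1) : kA2 c = true := by
  simp only [prioB] at h; simp only [kA2]
  by_cases he : PySem.Str.isIn "exp" c = true <;>
    by_cases hr : PySem.Str.isIn "research" c = true <;>
      by_cases hf : PySem.Str.isIn "flash" c = true <;>
        by_cases hp : PySem.Str.isIn "pro" c = true <;>
          simp_all

lemma prio01_of_kA2 (c : String) (h : kA2 c = true) : prioB c = 0 ∨ prioB c = 1 := by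
  simp only [kA2] at h; simp only [prioB]
  by_cases he : PySem.Str.isIn "exp" c = true <;>
    by_cases hr : PySem.Str.isIn "research" c = true <;>
      by_cases hf : PySem.Str.isIn "flash" c = true <;>
        by_cases hp : PySem.Str.isIn "pro" c = true <;>
          simp_all

-- pass 1 simulation
lemma pass_sim_0 :
    ∀ (cs s t : List String),
      (∀ c, prioB c = 0 → (c ∈ s ↔ c ∈ t)) →
      (sel kA1 s cs).2 = selp 0 t cs := by
  intro cs
  induction cs with
  | nil => intro s t _; simp [sel, selp]
  | cons c cs ih =>
    intro s t hmem
    simp only [sel, selp]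
    by_cases hs : c ∈ s <;> by_cases ht : c ∈ t
    · rw [if_pos (by simpa using hs), if_pos (by simpa using ht)]
      exact ih s t hmem
    · have hp : prioB c ≠ 0 := fun h => ht ((hmem c h).mp hs)
      rw [if_pos (by simpa using hs), if_neg (by simpa using ht), if_neg hp]
      refine ih s (t ++ [c]) ?_
      intro d hd
      rw [hmem d hd]
      simp only [List.mem_append, List.mem_singleton]
      constructor
      · exact Or.inl
      · rintro (h | rfl); exact h; exact absurd hd hp
    · have hp : prioB c ≠ 0 := fun h => hs ((hmem c h).mpr ht)
      have hk : ¬ kA1 c = true := fun h => hp ((kA1_iff c).mp h)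
      rw [if_neg (by simpa using hs), if_neg hk, if_pos (by simpa using ht)]
      exact ih s t hmem
    · by_cases hp : prioB c = 0
      · have hk : kA1 c = true := (kA1_iff c).mpr hp
        rw [if_neg (by simpa using hs), if_pos hk, if_neg (by simpa using ht), if_pos hp]
        simp only []
        congr 1
        refine ih (s ++ [c]) (t ++ [c]) ?_
        intro d hd
        simp only [List.mem_append, List.mem_singleton]
        rw [hmem d hd]
      · have hk : ¬ kA1 c = true := fun h => hp ((kA1_iff c).mp h)
        rw [if_neg (by simpa using hs), if_neg hk, if_neg (by simpa using ht), if_neg hp]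
        refine ih s (t ++ [c]) ?_
        intro d hd
        rw [hmem d hd]
        simp only [List.mem_append, List.mem_singleton]
        constructor
        · exact Or.inl
        · rintro (h | rfl); exact h; exact absurd hd hp

-- pass 2 simulation
lemma pass_sim_1 :
    ∀ (cs s t : List String),
      (∀ c ∈ cs, prioB c = 0 → c ∈ s) →
      (∀ c, prioB c = 1 → (c ∈ s ↔ c ∈ t)) →
      (sel kA2 s cs).2 = selp 1 t cs := by
  intro cs
  induction cs with
  | nil => intro s t _ _; simp [sel, selp]
  | cons c cs ih =>
    intro s t h0 hmem
    have h0' : ∀ d ∈ cs, prioB d = 0 → d ∈ s := fun d hd => h0 d (List.mem_cons_of_mem _ hd)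
    simp only [sel, selp]
    by_cases hs : c ∈ s <;> by_cases ht : c ∈ t
    · rw [if_pos (by simpa using hs), if_pos (by simpa using ht)]
      exact ih s t h0' hmem
    · have hp : prioB c ≠ 1 := fun h => ht ((hmem c h).mp hs)
      rw [if_pos (by simpa using hs), if_neg (by simpa using ht), if_neg hp]
      refine ih s (t ++ [c]) h0' ?_
      intro d hd
      rw [hmem d hd]
      simp only [List.mem_append, List.mem_singleton]
      constructor
      · exact Or.inl
      · rintro (h | rfl); exact h; exact absurd hd hp
    · have hp : prioB c ≠ 1 := fun h => hs ((hmem c h).mpr ht)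
      have hk : ¬ kA2 c = true := by
        intro h
        rcases prio01_of_kA2 c h with hq | hq
        · exact hs (h0 c List.mem_cons_self hq)
        · exact hp hq
      rw [if_neg (by simpa using hs), if_neg hk, if_pos (by simpa using ht)]
      exact ih s t h0' hmem
    · by_cases hp : prioB c = 1
      · have hk : kA2 c = true := kA2_of_prio1 c hp
        rw [if_neg (by simpa using hs), if_pos hk, if_neg (by simpa using ht), if_pos hp]
        simp only []
        congr 1
        refine ih (s ++ [c]) (t ++ [c])
          (fun d hd hq => List.mem_append_left _ (h0' d hd hq)) ?_
        intro d hd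
        simp only [List.mem_append, List.mem_singleton]
        rw [hmem d hd]
      · have hk : ¬ kA2 c = true := by
          intro h
          rcases prio01_of_kA2 c h with hq | hq
          · exact hs (h0 c List.mem_cons_self hq)
          · exact hp hq
        rw [if_neg (by simpa using hs), if_neg hk, if_neg (by simpa using ht), if_neg hp]
        refine ih s (t ++ [c]) h0' ?_
        intro d hd
        rw [hmem d hd]
        simp only [List.mem_append, List.mem_singleton]
        constructor
        · exact Or.inl
        · rintro (h | rfl); exact h; exact absurd hd hp

-- pass 3 simulation
lemma pass_sim_2 :
    ∀ (cs s t : List String),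
      (∀ c ∈ cs, prioB c ≠ 2 → c ∈ s) →
      (∀ c, prioB c = 2 → (c ∈ s ↔ c ∈ t)) →
      (sel (fun _ => true) s cs).2 = selp 2 t cs := by
  intro cs
  induction cs with
  | nil => intro s t _ _; simp [sel, selp]
  | cons c cs ih =>
    intro s t h0 hmem
    have h0' : ∀ d ∈ cs, prioB d ≠ 2 → d ∈ s := fun d hd => h0 d (List.mem_cons_of_mem _ hd)
    simp only [sel, selp]
    by_cases hs : c ∈ s <;> by_cases ht : c ∈ t
    · rw [if_pos (by simpa using hs), if_pos (by simpa using ht)]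
      exact ih s t h0' hmem
    · have hp : prioB c ≠ 2 := fun h => ht ((hmem c h).mp hs)
      rw [if_pos (by simpa using hs), if_neg (by simpa using ht), if_neg hp]
      refine ih s (t ++ [c]) h0' ?_
      intro d hd
      rw [hmem d hd]
      simp only [List.mem_append, List.mem_singleton]
      constructor
      · exact Or.inl
      · rintro (h | rfl); exact h; exact absurd hd hp
    · exfalso
      by_cases hp : prioB c = 2
      · exact hs ((hmem c hp).mpr ht)
      · exact hs (h0 c List.mem_cons_self hp)
    · have hp : prioB c = 2 := by
        by_contra hp
        exact hs (h0 c List.mem_cons_self hp)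
      rw [if_neg (by simpa using hs),
          if_pos (show True from trivial),
          if_neg (by simpa using ht), if_pos hp]
      simp only []
      congr 1
      refine ih (s ++ [c]) (t ++ [c])
        (fun d hd hq => List.mem_append_left _ (h0' d hd hq)) ?_
      intro d hd
      simp only [List.mem_append, List.mem_singleton]
      rw [hmem d hd]

-- B's single fold computes the three selp buckets
lemma foldB_eq :
    ∀ (cands t b0 b1 b2 : List String),
      (cands.foldl stepB (t, (b0, b1, b2))).2 =
        (b0 ++ selp 0 t cands, b1 ++ selp 1 t cands, b2 ++ selp 2 t cands) := by
  intro cands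
  induction cands with
  | nil => intro t b0 b1 b2; simp [selp]
  | cons c cs ih =>
    intro t b0 b1 b2
    simp only [List.foldl_cons, stepB, selp, PySem.Set.contains, PySem.Set.add]
    by_cases ht : t.contains c = true
    · rw [if_pos ht, if_pos ht, if_pos ht, if_pos ht]
      exact ih t b0 b1 b2
    · rw [if_neg ht, if_neg ht, if_neg ht, if_neg ht, if_neg ht]
      rcases prioB_cases c with hp | hp | hp
      · rw [if_pos hp, if_pos hp, ih]
        simp [hp]
      · rw [if_neg (by omega), if_pos hp, if_neg (by omega), if_pos hp, ih]
        simp [hp]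
      · rw [if_neg (by omega), if_neg (by omega), if_neg (by omega), if_neg (by omega), if_pos hp, ih]
        simp

theorem clean_candidates_py_spec_aux (cands : List String) :
    clean_candidates_py cands = clean_candidates_py_alt cands := by
  simp only [clean_candidates_py, clean_candidates_py_alt, PySem.Set.empty]
  rw [foldl_step_eq kA1 stepA1 hstepA1,
      foldl_step_eq kA2 stepA2 hstepA2,
      foldl_step_eq (fun _ => true) stepA3 hstepA3,
      foldB_eq]
  simp only [List.nil_append]
  have e0 : (sel kA1 ([] : List String) cands).2 = selp 0 [] cands :=
    pass_sim_0 cands [] [] (by intro c _; rfl)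
  have hS0 : ∀ x, x ∈ (sel kA1 ([] : List String) cands).1 ↔ (kA1 x = true ∧ x ∈ cands) := by
    intro x; rw [sel_fst_mem]; simp
  have e1 : (sel kA2 (sel kA1 ([] : List String) cands).1 cands).2 = selp 1 [] cands := by
    apply pass_sim_1
    · intro c hc hp
      exact (hS0 c).mpr ⟨(kA1_iff c).mpr hp, hc⟩
    · intro c hp
      simp only [List.not_mem_nil, iff_false]
      intro hmem
      have := ((hS0 c).mp hmem).1
      rw [kA1_iff] at this
      omega
  have hS1 : ∀ x, x ∈ (sel kA2 (sel kA1 ([] : List String) cands).1 cands).1 ↔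
      (x ∈ (sel kA1 ([] : List String) cands).1 ∨ (kA2 x = true ∧ x ∈ cands)) := by
    intro x; rw [sel_fst_mem]
  have e2 : (sel (fun _ => true) (sel kA2 (sel kA1 ([] : List String) cands).1 cands).1 cands).2 = selp 2 [] cands := by
    apply pass_sim_2
    · intro c hc hp
      rw [hS1]
      have h012 : prioB c = 0 ∨ prioB c = 1 := by
        have : prioB c = 0 ∨ prioB c = 1 ∨ prioB c = 2 := by
          simp only [prioB]
          split <;> first | omega | (split <;> first | omega | (split <;> omega))
        omega
      rcases h012 with h | h
      · exact Or.inl ((hS0 c).mpr ⟨(kA1_iff c).mpr h, hc⟩)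
      · exact Or.inr ⟨kA2_of_prio1 c h, hc⟩
    · intro c hp
      simp only [List.not_mem_nil, iff_false]
      rw [hS1]
      rintro (h | ⟨hk, _⟩)
      · have := ((hS0 c).mp h).1
        rw [kA1_iff] at this
        omega
      · rcases prio01_of_kA2 c hk with h | h <;> omega
  rw [e0, e1, e2]

-- ===== VERDICT (by name: the statement is the Claim_ definition above) =====
theorem clean_candidates_py_spec : Claim_equal_clean_candidates_py := by
  intro cands _
  exact clean_candidates_py_spec_aux cands
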